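-- pv_equiv track=rewrite | github.com/xjahic/aoc-2021 | 3/part2.py | scrubber_rating
-- ===== SOURCE A (Python) =====
-- def scrubber_rating(lines):
--     for i in range(1, len(lines[0])):
--         most_common = {}
--         for line in lines:
--             bit = line[i]
--             most_common[bit] = most_common.get(bit, 0) + 1
--
--         least_common_in_iteration = '0'  # defaulted to 0
--         if most_common.get('0', 0) > most_common.get('1', 0):
--             least_common_in_iteration = '1'
--
--         updated_lines_for_scrubber_rating = []
--         for line_in_scrubber_rating in lines:
--             if line_in_scrubber_rating[i] == least_common_in_iteration:
--                 updated_lines_for_scrubber_rating.append(line_in_scrubber_rating)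
--
--         lines = updated_lines_for_scrubber_rating
--         if len(lines) == 1:
--             break
--
--     scrubber_generator_rating = int(lines[0], 2)
--     return scrubber_generator_rating
-- ===== SOURCE B (Python) =====
-- def scrubber_rating(lines):
--     stop = len(lines[0])
--
--     def go(cands, i):
--         if i >= stop:
--             return int(cands[0], 2)
--         buckets = {}
--         for l in cands:
--             buckets.setdefault(l[i], []).append(l)
--         least = '1' if len(buckets.get('0', [])) > len(buckets.get('1', [])) else '0'
--         nxt = buckets.get(least, [])
--         if len(nxt) == 1:
--             return int(nxt[0], 2)
--         return go(nxt, i + 1)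
--
--     return go(lines, 1)
-- ===== Notes on version B (the rewrite author's own statement) =====
-- stated objective: alternative
-- what changed: B recursively partitions the candidates into per-character buckets in a single setdefault-grouping pass per bit, reading both counts and the next candidate list off the partition, instead of A's two staged passes per bit (a counting dict, then a separate append-filter loop) with an accumulator variable and an after-filter break.
import Mathlib
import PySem

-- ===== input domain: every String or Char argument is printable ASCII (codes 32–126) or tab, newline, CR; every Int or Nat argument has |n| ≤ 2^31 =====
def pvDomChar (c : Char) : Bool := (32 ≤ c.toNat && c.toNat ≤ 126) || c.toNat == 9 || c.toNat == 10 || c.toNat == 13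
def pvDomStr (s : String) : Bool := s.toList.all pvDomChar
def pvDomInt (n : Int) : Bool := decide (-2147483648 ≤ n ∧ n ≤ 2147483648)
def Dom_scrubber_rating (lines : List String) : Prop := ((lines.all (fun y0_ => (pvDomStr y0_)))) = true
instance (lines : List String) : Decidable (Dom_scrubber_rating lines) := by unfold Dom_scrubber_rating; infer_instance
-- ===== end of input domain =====

-- B replaces A's two staged passes per bit (count dict, then append-filter loop with a break) by a
-- recursive single-pass partition into per-character buckets; same return value wherever A returns.

-- line[i] for the in-range indices Pre_ admits (Python raises out of range; such inputs are outside Pre_)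
def pyCharAt (l : String) (i : Nat) : Char := l.toList.getD i ' '

-- ===== PORT A =====
-- the 'for i in range(1, len(lines[0]))' loop with its break, as structural recursion
-- on the number of remaining positions (rem = stop - i)
def scrubberGoA : List String → Nat → Nat → List String
  | ls, _, 0 => ls
  | ls, i, rem + 1 =>
    let mc := ls.foldl (fun d line => d.insert (pyCharAt line i) (d.getD (pyCharAt line i) 0 + 1))
      (PySem.Dict.empty : PySem.Dict Char Int)
    let least := if mc.getD '0' 0 > mc.getD '1' 0 then '1' else '0'
    let upd := ls.foldl (fun acc line => if pyCharAt line i == least then acc ++ [line] else acc)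
      ([] : List String)
    if upd.length = 1 then upd else scrubberGoA upd (i + 1) rem

def scrubber_rating (lines : List String) : Int :=
  (PySem.Int.ofStrBase?
    ((scrubberGoA lines 1 ((lines.headD "").toList.length - 1)).headD "") 2).getD 0

-- ===== PORT B =====
-- Source B's recursive 'go(cands, i)': partition cands into buckets by the character at i
-- (setdefault(..,[]).append = modify with default [] appending), pick the minority bucket,
-- return its lone line's value or recurse; rem = stop - i drives the 'i >= stop' base case
def scrubberGoB : List String → Nat → Nat → Int
  | cands, _, 0 => (PySem.Int.ofStrBase? (cands.headD "") 2).getD 0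
  | cands, i, rem + 1 =>
    let buckets := cands.foldl (fun d l => d.modify (pyCharAt l i) [] (· ++ [l]))
      (PySem.Dict.empty : PySem.Dict Char (List String))
    let least := if (buckets.getD '0' []).length > (buckets.getD '1' []).length then '1' else '0'
    let nxt := buckets.getD least []
    if nxt.length = 1 then (PySem.Int.ofStrBase? (nxt.headD "") 2).getD 0
    else scrubberGoB nxt (i + 1) rem

def scrubber_rating_alt (lines : List String) : Int :=
  scrubberGoB lines 1 ((lines.headD "").toList.length - 1)

-- ===== PRECONDITION & SPEC =====
-- the lines A's step at position i keeps: those carrying the strictly-less-common of '0'/'1' (ties keep '0')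
def pvKept (ls : List String) (i : Nat) : List String :=
  ls.filter (fun l => pyCharAt l i == (if ls.countP (fun l => pyCharAt l i == '0') > ls.countP (fun l => pyCharAt l i == '1') then '1' else '0'))

-- whether int(lines[0], 2) returns (False on [] : Python's IndexError)
def pvParses : List String → Bool
  | [] => false
  | l :: _ => (PySem.Int.ofStrBase? l 2).isSome

-- Pre_ admits exactly the inputs on which the Python A returns: at each position every remaining
-- line is long enough (else IndexError), and the first line surviving when the loop breaks or ends
-- parses in base 2 (an emptied survivor list or a non-binary line raises Index/ValueError).
def pvOkFrom : List String → Nat → Nat → Bool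
  | ls, _, 0 => pvParses ls
  | ls, i, rem + 1 => (ls.all fun l => i < l.toList.length) && (if (pvKept ls i).length = 1 then pvParses (pvKept ls i) else pvOkFrom (pvKept ls i) (i + 1) rem)

def Pre_scrubber_rating (lines : List String) : Prop :=
  pvOkFrom lines 1 ((lines.headD "").toList.length - 1) = true
instance (lines : List String) : Decidable (Pre_scrubber_rating lines) := by
  unfold Pre_scrubber_rating; infer_instance

def pvWitness_scrubber_rating : List String := ["00", "01", "10", "11"]

def Spec_scrubber_rating (lines : List String) (out : Int) : Prop := out = scrubber_rating_alt lines
instance (lines : List String) (out : Int) : Decidable (Spec_scrubber_rating lines out) := by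
  unfold Spec_scrubber_rating; infer_instance

-- ===== CLAIM (what is proved, stated in full; the proofs are below) =====
def Claim_equal_scrubber_rating : Prop := ∀ (lines : List String), Dom_scrubber_rating lines → Pre_scrubber_rating lines → Spec_scrubber_rating lines (scrubber_rating lines)

-- ===== LEMMAS AND PROOFS =====

-- A's dict count of lines carrying character c at position i is the length of B's bucket for c
theorem counter_getD (ls : List String) (key : String → Char) (c : Char) :
    (ls.foldl (fun d line => d.insert (key line) (d.getD (key line) 0 + 1))
        (PySem.Dict.empty : PySem.Dict Char Int)).getD c 0
      = ((ls.countP (fun l => key l == c)) : Int) := by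
  have hf : ∀ (d : PySem.Dict Char Int) (x : Char), d.insert x (d.getD x 0 + 1) = d.modify x 0 (· + 1) :=
    fun d x => PySem.Dict.ext_iff.mpr rfl
  have h1 : (ls.foldl (fun d line => d.insert (key line) (d.getD (key line) 0 + 1))
        (PySem.Dict.empty : PySem.Dict Char Int))
      = (ls.map key).foldl (fun d x => d.modify x 0 (· + 1)) PySem.Dict.empty := by
    rw [List.foldl_map]; simp only [hf]
  rw [h1, PySem.Dict.getD_foldl_modify_add_one]
  simp [List.count_eq_countP, List.countP_map, Function.comp_def]

-- B's bucket for character c is the sublist of candidates carrying c at position i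
theorem bucket_getD (ls : List String) (i : Nat) (c : Char) :
    (ls.foldl (fun d l => d.modify (pyCharAt l i) [] (· ++ [l]))
        (PySem.Dict.empty : PySem.Dict Char (List String))).getD c []
      = ls.filter (fun l => pyCharAt l i == c) := by
  have h1 : (ls.foldl (fun d l => d.modify (pyCharAt l i) [] (· ++ [l]))
        (PySem.Dict.empty : PySem.Dict Char (List String)))
      = (ls.map (fun l => (pyCharAt l i, l))).foldl
          (fun d p => d.modify p.1 [] (· ++ [p.2])) PySem.Dict.empty := by
    rw [List.foldl_map]
  rw [h1, PySem.Dict.getD_foldl_modify_append]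
  simp [List.filter_map, Function.comp_def]

-- A's append-filter pass over ls equals B's minority bucket: both are pvKept ls i
theorem stepA_eq_kept (ls : List String) (i : Nat) :
    ls.foldl (fun acc line => if pyCharAt line i ==
        (if (ls.foldl (fun d line => d.insert (pyCharAt line i) (d.getD (pyCharAt line i) 0 + 1))
              (PySem.Dict.empty : PySem.Dict Char Int)).getD '0' 0 >
            (ls.foldl (fun d line => d.insert (pyCharAt line i) (d.getD (pyCharAt line i) 0 + 1))
              (PySem.Dict.empty : PySem.Dict Char Int)).getD '1' 0
          then '1' else '0') then acc ++ [line] else acc) ([] : List String)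
      = pvKept ls i := by
  rw [counter_getD ls (fun l => pyCharAt l i) '0', counter_getD ls (fun l => pyCharAt l i) '1']
  rw [PySem.List.foldl_append_if_eq_filter]
  unfold pvKept
  simp [Nat.cast_lt]

theorem stepB_eq_kept (ls : List String) (i : Nat) :
    (ls.foldl (fun d l => d.modify (pyCharAt l i) [] (· ++ [l]))
        (PySem.Dict.empty : PySem.Dict Char (List String))).getD
      (if ((ls.foldl (fun d l => d.modify (pyCharAt l i) [] (· ++ [l]))
              (PySem.Dict.empty : PySem.Dict Char (List String))).getD '0' []).length >
          ((ls.foldl (fun d l => d.modify (pyCharAt l i) [] (· ++ [l]))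
              (PySem.Dict.empty : PySem.Dict Char (List String))).getD '1' []).length
        then '1' else '0') []
      = pvKept ls i := by
  simp only [bucket_getD]
  unfold pvKept
  simp [List.countP_eq_length_filter]

-- the two recursions agree: A's surviving list, parsed, is B's result
theorem loop_eq : ∀ (rem i : Nat) (ls : List String),
    (PySem.Int.ofStrBase? ((scrubberGoA ls i rem).headD "") 2).getD 0 = scrubberGoB ls i rem := by
  intro rem
  induction rem with
  | zero => intro i ls; rfl
  | succ m ih =>
    intro i ls
    rw [scrubberGoA, scrubberGoB]
    simp only [stepA_eq_kept ls i, stepB_eq_kept ls i]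
    by_cases hk1 : (pvKept ls i).length = 1
    · rw [if_pos hk1, if_pos hk1]
    · rw [if_neg hk1, if_neg hk1, ih (i + 1) (pvKept ls i)]

-- ===== VERDICT (by name: the statement is the Claim_ definition above) =====
theorem scrubber_rating_spec : Claim_equal_scrubber_rating := by
  intro lines _hdom _hpre
  unfold Spec_scrubber_rating scrubber_rating scrubber_rating_alt
  exact loop_eq ((lines.headD "").toList.length - 1) 1 lines
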